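-- pv_equiv track=rewrite | github.com/thanhbinhnd2002/multi-agent_external_competition_model | multi_Beta_Simulate_opt.py | compute_total_support
-- ===== SOURCE A (Python) =====
-- def compute_total_support(x_state, alpha_idx):
--     support = 0
--     for j in range(len(x_state)):
--         if j == alpha_idx:
--             continue
--         if x_state[j] > 0:
--             support += 1
--         elif x_state[j] < 0:
--             support -= 1
--     return support
-- ===== SOURCE B (Python) =====
-- def compute_total_support(x_state, alpha_idx):
--     if 0 <= alpha_idx < len(x_state):
--         considered = x_state[:alpha_idx] + x_state[alpha_idx + 1:]
--     else:
--         considered = x_state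
--     positives = len([v for v in considered if v > 0])
--     negatives = len([v for v in considered if v < 0])
--     return positives - negatives
-- ===== Notes on version B (the rewrite author's own statement) =====
-- stated objective: alternative
-- what changed: B first materialises the considered elements by slicing the indexed element out of the list (or taking the whole list when alpha_idx is out of range), then returns the count of positive entries minus the count of negative entries via two filter passes, instead of A's single scan with a per-index skip branch and a running +-1 accumulator.
import Mathlib
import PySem

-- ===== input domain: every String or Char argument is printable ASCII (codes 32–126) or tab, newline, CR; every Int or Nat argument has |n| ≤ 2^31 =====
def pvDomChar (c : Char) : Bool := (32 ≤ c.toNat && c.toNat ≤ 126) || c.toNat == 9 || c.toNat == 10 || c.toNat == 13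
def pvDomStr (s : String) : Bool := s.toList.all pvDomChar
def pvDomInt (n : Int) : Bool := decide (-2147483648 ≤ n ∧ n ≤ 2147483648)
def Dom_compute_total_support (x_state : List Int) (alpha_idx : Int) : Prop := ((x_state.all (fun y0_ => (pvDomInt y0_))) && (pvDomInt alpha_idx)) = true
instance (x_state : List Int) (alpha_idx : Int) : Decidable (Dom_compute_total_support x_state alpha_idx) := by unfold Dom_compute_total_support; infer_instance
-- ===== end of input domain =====

-- B slices the indexed element out of the list (whole list when alpha_idx is out of
-- range) and returns count of positives minus count of negatives, instead of A's
-- single scan with a skip branch and a running accumulator.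

-- ===== PORT A =====
def compute_total_support (x_state : List Int) (alpha_idx : Int) : Int :=
  (PySem.List.pyRange 0 (PySem.List.len x_state) 1).foldl
    (fun support j =>
      if j = alpha_idx then support
      else if PySem.List.pyGetD x_state j 0 > 0 then support + 1
      else if PySem.List.pyGetD x_state j 0 < 0 then support - 1
      else support) 0

-- ===== PORT B =====
def compute_total_support_alt (x_state : List Int) (alpha_idx : Int) : Int :=
  let considered :=
    if 0 ≤ alpha_idx ∧ alpha_idx < PySem.List.len x_state then
      PySem.List.slice x_state none (some alpha_idx)
        ++ PySem.List.slice x_state (some (alpha_idx + 1)) none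
    else x_state
  let positives := (considered.filter (fun v => v > 0)).length
  let negatives := (considered.filter (fun v => v < 0)).length
  (positives : Int) - (negatives : Int)

-- ===== PRECONDITION & SPEC =====
def Spec_compute_total_support (x_state : List Int) (alpha_idx : Int) (out : Int) : Prop := out = compute_total_support_alt x_state alpha_idx
instance (x_state : List Int) (alpha_idx : Int) (out : Int) : Decidable (Spec_compute_total_support x_state alpha_idx out) := by unfold Spec_compute_total_support; infer_instance

-- ===== CLAIM (what is proved, stated in full; the proofs are below) =====
def Claim_equal_compute_total_support : Prop := ∀ (x_state : List Int) (alpha_idx : Int), Dom_compute_total_support x_state alpha_idx → Spec_compute_total_support x_state alpha_idx (compute_total_support x_state alpha_idx)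

-- ===== LEMMAS AND PROOFS =====

-- the sign of an entry, the quantity A's accumulator adds per non-skipped index
def pvSign (v : Int) : Int := (if v > 0 then 1 else 0) - (if v < 0 then 1 else 0)

-- A's loop body adds g j at each step
lemma pv_foldl_add_gen (g : Int → Int) (f : Int → Int → Int)
    (hf : ∀ s j, f s j = s + g j) :
    ∀ (l : List Int) (init : Int), l.foldl f init = init + (l.map g).sum := by
  intro l
  induction l with
  | nil => intro init; simp
  | cons x t ih => intro init; simp [hf, ih, add_assoc]

-- B's two filter counts, as a difference, equal the sign-sum of the list
lemma pv_count_diff (l : List Int) :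
    ((l.filter (fun v => v > 0)).length : Int) - ((l.filter (fun v => v < 0)).length : Int)
      = (l.map pvSign).sum := by
  induction l with
  | nil => simp
  | cons x t ih =>
    simp only [List.filter_cons, List.map_cons, List.sum_cons, ← ih]
    have hx : pvSign x = (if x > 0 then 1 else 0) - (if x < 0 then 1 else 0) := rfl
    by_cases h1 : x > 0 <;> by_cases h2 : x < 0 <;>
      simp [hx, h1, h2] <;> omega

-- A's scan-with-skip over the first n indices equals the sign-sum of take n,
-- minus the sign at alpha_idx when alpha_idx < n
lemma pv_sum_range (xs : List Int) (a : Int) :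
    ∀ n : Nat, n ≤ xs.length →
      ((PySem.List.pyRange 0 (n : Int) 1).map
        (fun j => if j = a then 0 else pvSign (PySem.List.pyGetD xs j 0))).sum
      = ((xs.take n).map pvSign).sum
        - (if 0 ≤ a ∧ a < (n : Int) then pvSign (PySem.List.pyGetD xs a 0) else 0) := by
  intro n
  induction n with
  | zero => intro _; simp [PySem.List.pyRange_one_eq_nil]
  | succ n ih =>
    intro hle
    have hn : n < xs.length := by omega
    have hstep : PySem.List.pyRange 0 ((n : Int) + 1) 1
        = PySem.List.pyRange 0 (n : Int) 1 ++ [(n : Int)] := by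
      exact PySem.List.pyRange_one_succ_right (by positivity)
    have htake : xs.take (n + 1) = xs.take n ++ [xs[n]] :=
      List.take_succ_eq_append_getElem hn
    have hget : PySem.List.pyGetD xs (n : Int) 0 = xs[n] := by
      rw [PySem.List.pyGetD_natCast]
      simp [List.getD, hn]
    push_cast
    rw [hstep, htake]
    simp only [List.map_append, List.sum_append, ih (by omega), List.map_cons,
      List.map_nil, List.sum_cons, List.sum_nil, hget]
    by_cases hja : (n : Int) = a
    · have hga : PySem.List.pyGetD xs a 0 = xs[n] := by rw [← hja, hget]
      simp only [hja, hga]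
      split_ifs <;> first | ring1 | omega
    · simp only [if_neg hja]
      split_ifs <;> first | ring1 | omega

-- removing xs[a] by slicing drops exactly pvSign xs[a] from the list's sign-sum
lemma pv_slice_sum (xs : List Int) (a : Int) (h0 : 0 ≤ a) (h1 : a < (xs.length : Int)) :
    (((PySem.List.slice xs none (some a)
        ++ PySem.List.slice xs (some (a + 1)) none).map pvSign)).sum
      = (xs.map pvSign).sum - pvSign (PySem.List.pyGetD xs a 0) := by
  lift a to ℕ using h0 with n
  have hn : n < xs.length := by exact_mod_cast h1
  have hget : PySem.List.pyGetD xs (n : Int) 0 = xs[n] := by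
    rw [PySem.List.pyGetD_natCast]
    simp [List.getD, hn]
  have hcast : ((n : Int) + 1) = (((n + 1 : ℕ)) : Int) := by push_cast; ring
  rw [hcast, PySem.List.slice_to_natCast, PySem.List.slice_from_natCast, hget]
  have hsplit : xs = xs.take n ++ xs[n] :: xs.drop (n + 1) := by
    conv_lhs => rw [← List.take_append_drop n xs]
    rw [List.drop_eq_getElem_cons hn]
  have hsum : (List.map pvSign xs).sum
      = ((xs.take n).map pvSign).sum + pvSign xs[n]
        + ((xs.drop (n + 1)).map pvSign).sum := by
    conv_lhs => rw [hsplit]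
    simp only [List.map_append, List.map_cons, List.sum_append, List.sum_cons]
    ring
  rw [List.map_append, List.sum_append, hsum]
  ring

-- ===== VERDICT (by name: the statement is the Claim_ definition above) =====
theorem compute_total_support_spec : Claim_equal_compute_total_support := by
  intro xs a _
  unfold Spec_compute_total_support compute_total_support compute_total_support_alt
  rw [pv_foldl_add_gen (fun j => if j = a then 0 else pvSign (PySem.List.pyGetD xs j 0))
    _ (by
      intro s j
      unfold pvSign
      by_cases h1 : j = a <;> by_cases h2 : PySem.List.pyGetD xs j 0 > 0 <;>
        by_cases h3 : PySem.List.pyGetD xs j 0 < 0 <;> simp [h1, h2, h3] <;> omega)]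
  have hrange := pv_sum_range xs a xs.length le_rfl
  simp only [PySem.List.len] at *
  rw [hrange, List.take_length, pv_count_diff]
  by_cases hc : 0 ≤ a ∧ a < (xs.length : Int)
  · rw [if_pos hc, if_pos hc, pv_slice_sum xs a hc.1 hc.2]
    ring
  · rw [if_neg hc, if_neg hc]
    ring
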